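-- pv_equiv track=rewrite | github.com/jotaf98/mapnet | utils.py | sub2ind
-- ===== SOURCE A (Python) =====
-- def sub2ind(sub, shape, check_bounds=True):
--   """Tensor subscripts to linear index"""
--   #assert len(shape) == 2  # 2D test
--   #idx = sub[0] * shape[1] + sub[1]
--   #return idx
--
--   idx = 0   # if isinstance(sub[0], int) else sub[0].new_zeros(())
--   stride = 1
--   for (i, n) in reversed(list(zip(sub, shape))):
--     if check_bounds:
--       if isinstance(i, int): assert i >= 0 and i < n
--       else: assert (i >= 0).all() and (i < n).all()
--     idx += i * stride
--     stride *= n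
--   return idx
-- ===== SOURCE B (Python) =====
-- def sub2ind(sub, shape, check_bounds=True):
--   """Tensor subscripts to linear index (forward Horner accumulation, no stride)"""
--   idx = 0
--   for (i, n) in zip(sub, shape):
--     if check_bounds:
--       if isinstance(i, int): assert i >= 0 and i < n
--       else: assert (i >= 0).all() and (i < n).all()
--     idx = idx * n + i
--   return idx
-- ===== Notes on version B (the rewrite author's own statement) =====
-- stated objective: simpler
-- what changed: Forward Horner accumulation idx = idx*n + i over zip(sub, shape) replaces A's reversed traversal with a separately maintained stride variable; the Lean port of B is a tail-recursive accumulator pass, A's a reversed pair-valued fold.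
-- outside the precondition, e.g. on sub2ind([2], [2], True): A raises AssertionError, B raises AssertionError
import Mathlib
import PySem

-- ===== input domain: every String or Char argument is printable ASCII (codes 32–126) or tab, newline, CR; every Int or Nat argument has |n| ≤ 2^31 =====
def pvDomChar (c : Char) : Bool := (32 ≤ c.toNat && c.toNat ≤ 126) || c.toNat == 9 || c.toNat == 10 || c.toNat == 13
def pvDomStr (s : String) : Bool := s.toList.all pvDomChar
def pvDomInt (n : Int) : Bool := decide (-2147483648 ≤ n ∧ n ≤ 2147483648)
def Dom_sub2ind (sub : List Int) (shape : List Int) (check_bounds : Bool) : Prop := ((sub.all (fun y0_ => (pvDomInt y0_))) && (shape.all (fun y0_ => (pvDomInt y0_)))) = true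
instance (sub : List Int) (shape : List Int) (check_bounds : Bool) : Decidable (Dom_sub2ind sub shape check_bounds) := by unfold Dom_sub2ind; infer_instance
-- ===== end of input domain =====

-- B replaces A's reversed traversal with a stride variable by a forward Horner accumulation
-- idx = idx*n + i, ported as a tail-recursive accumulator pass (objective: simpler).
-- ===== PORT A =====
-- assert failures (check_bounds with an out-of-bounds subscript) raise in Python; excluded by Pre_sub2ind.
def sub2ind (sub : List Int) (shape : List Int) (check_bounds : Bool) : Int :=
  (((sub.zip shape).reverse).foldl
    (fun (st : Int × Int) (p : Int × Int) => (st.1 + p.1 * st.2, st.2 * p.2)) (0, 1)).1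

-- ===== PORT B =====
-- Source B's forward loop, as a tail recursion carrying Horner's accumulator idx
def hornerGo : List (Int × Int) → Int → Int
  | [], idx => idx
  | (i, n) :: rest, idx => hornerGo rest (idx * n + i)

def sub2ind_alt (sub : List Int) (shape : List Int) (check_bounds : Bool) : Int :=
  hornerGo (sub.zip shape) 0

-- ===== PRECONDITION & SPEC =====
-- Pre_ excludes exactly the inputs on which A raises AssertionError (check_bounds set and some
-- zipped subscript outside [0, n)); B raises there too.
def Pre_sub2ind (sub : List Int) (shape : List Int) (check_bounds : Bool) : Prop :=
  check_bounds = true → ∀ p ∈ sub.zip shape, 0 ≤ p.1 ∧ p.1 < p.2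
instance (sub : List Int) (shape : List Int) (check_bounds : Bool) : Decidable (Pre_sub2ind sub shape check_bounds) := by unfold Pre_sub2ind; infer_instance
def pvWitness_sub2ind : List Int × List Int × Bool := ([1, 0, 2], [2, 3, 4], true)
def Spec_sub2ind (sub : List Int) (shape : List Int) (check_bounds : Bool) (out : Int) : Prop := out = sub2ind_alt sub shape check_bounds
instance (sub : List Int) (shape : List Int) (check_bounds : Bool) (out : Int) : Decidable (Spec_sub2ind sub shape check_bounds out) := by unfold Spec_sub2ind; infer_instance

-- ===== CLAIM (what is proved, stated in full; the proofs are below) =====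
def Claim_equal_sub2ind : Prop := ∀ (sub : List Int) (shape : List Int) (check_bounds : Bool), Dom_sub2ind sub shape check_bounds → Pre_sub2ind sub shape check_bounds → Spec_sub2ind sub shape check_bounds (sub2ind sub shape check_bounds)

-- ===== LEMMAS AND PROOFS =====
-- Horner with accumulator a equals a * (product of sizes) + Horner from 0.
theorem hornerGo_acc (l : List (Int × Int)) (a : Int) :
    hornerGo l a = a * (l.foldr (fun p s => p.2 * s) 1) + hornerGo l 0 := by
  induction l generalizing a with
  | nil => simp [hornerGo]
  | cons h t ih =>
    obtain ⟨i, n⟩ := h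
    simp only [hornerGo, List.foldr_cons]
    rw [ih (a * n + i), ih (0 * n + i)]
    ring

-- A's reversed fold computes (B's Horner value, product of sizes).
theorem rev_fold_eq (l : List (Int × Int)) :
    (l.reverse.foldl (fun (st : Int × Int) (p : Int × Int) => (st.1 + p.1 * st.2, st.2 * p.2)) (0, 1))
      = (hornerGo l 0, l.foldr (fun p s => p.2 * s) 1) := by
  induction l with
  | nil => simp [hornerGo]
  | cons h t ih =>
    obtain ⟨i, n⟩ := h
    simp only [List.reverse_cons, List.foldl_append, List.foldl_cons, List.foldl_nil, ih,
      List.foldr_cons, hornerGo]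
    rw [hornerGo_acc t (0 * n + i)]
    refine Prod.ext ?_ ?_ <;> simp <;> ring

-- ===== VERDICT (by name: the statement is the Claim_ definition above) =====
theorem sub2ind_spec : Claim_equal_sub2ind := by
  intro sub shape cb _ _
  unfold Spec_sub2ind sub2ind sub2ind_alt
  rw [rev_fold_eq]
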